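-- pv_equiv track=rewrite | github.com/skotniczny/game-of-life-py | decoder.py | parse
-- ===== SOURCE A (Python) =====
-- def rle_decode(data):
--     decode = ''
--     count = ''
--     for char in data:
--         if char.isdigit():
--             count += char
--         else:
--             decode += char * int(count if count != "" else "1")
--             count = ''
--     return decode
--
-- def parse(pattern):
--     pattern = rle_decode(pattern)
--     output = []
--     for item in pattern.split("$"):
--         row = []
--         for i in range(len(item)):
--             if item[i] == "o":
--                 row.append(i)
--         output.append(row)
--     return output
-- ===== SOURCE B (Python) =====
-- def parse(pattern):
--     # Single pass over the RLE tokens: track the column index directly and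
--     # emit only the alive ('o') positions; never builds the expanded string.
--     output = []
--     row = []
--     col = 0
--     count = ""
--     for ch in pattern:
--         if ch.isdigit():
--             count += ch
--         else:
--             n = int(count) if count else 1
--             count = ""
--             if ch == "$":
--                 if n > 0:
--                     output.append(row)
--                     output.extend([] for _ in range(n - 1))
--                     row = []
--                     col = 0
--             elif ch == "o":
--                 row.extend(range(col, col + n))
--                 col += n
--             else:
--                 col += n
--     output.append(row)
--     return output
-- ===== Notes on version B (the rewrite author's own statement) =====
-- stated objective: faster
-- what changed: Instead of expanding the RLE string character by character, splitting it on '$' and scanning every expanded cell, B makes a single pass over the RLE tokens, tracking the current column and emitting only the alive ('o') positions.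
import Mathlib
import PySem

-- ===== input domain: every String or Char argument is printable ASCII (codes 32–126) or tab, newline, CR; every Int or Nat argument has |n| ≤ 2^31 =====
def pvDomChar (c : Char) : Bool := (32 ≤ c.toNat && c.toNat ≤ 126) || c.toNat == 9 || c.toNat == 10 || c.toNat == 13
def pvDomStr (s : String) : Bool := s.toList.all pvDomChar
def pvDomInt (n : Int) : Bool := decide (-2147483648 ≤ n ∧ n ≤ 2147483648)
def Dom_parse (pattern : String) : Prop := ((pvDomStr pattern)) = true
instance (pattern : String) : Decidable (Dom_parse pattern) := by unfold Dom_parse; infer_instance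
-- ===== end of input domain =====

-- B replaces A's decode-expand-then-split-then-scan pipeline by a single pass over the
-- RLE tokens that tracks the column index and emits only the 'o' positions (objective: faster).


-- ===== PORT A =====
-- rle_decode: foldl over the chars with the pair (decode, count) of accumulator strings.
-- 'int(count if count != "" else "1")' never raises in A (the argument is a nonempty digit
-- string or "1"), so '.getD 0' is never taken; 'char * n' is PySem.List.pyRepeat.
def pvRleDecode (data : List Char) : List Char :=
  (data.foldl
    (fun (s : List Char × List Char) c =>
      if PySem.Chars.isdigit c then (s.1, s.2 ++ [c])
      else (s.1 ++ PySem.List.pyRepeat [c]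
              ((PySem.Int.ofChars? (if s.2 ≠ [] then s.2 else ['1'])).getD 0), []))
    ([], [])).1

-- the inner 'for i in range(len(item)): if item[i] == "o": row.append(i)' loop;
-- 'item[i]' is in range for every i of the range, so 'pyGet? = some' is exact.
def parse (pattern : String) : List (List Int) :=
  let p := pvRleDecode pattern.toList
  (PySem.Chars.splitOn p ['$']).foldl
    (fun output item =>
      output ++ [(PySem.List.pyRange 0 (item.length : Int)).foldl
        (fun row i => if PySem.List.pyGet? item i = some 'o' then row ++ [i] else row) []])
    []

-- ===== PORT B =====
-- Source B's loop as structural recursion over the chars; state = (output, row, col, count).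
def parseAltGo : List Char → List (List Int) → List Int → Int → List Char → List (List Int)
  | [], output, row, _, _ => output ++ [row]
  | c :: cs, output, row, col, count =>
    if PySem.Chars.isdigit c then
      parseAltGo cs output row col (count ++ [c])
    else
      -- n = int(count) if count else 1 ; int never raises on a nonempty digit string
      let n : Int := if count ≠ [] then (PySem.Int.ofChars? count).getD 0 else 1
      if c = '$' then
        if 0 < n then
          parseAltGo cs (output ++ [row] ++ List.replicate (n - 1).toNat []) [] 0 []
        else parseAltGo cs output row col []
      else if c = 'o' then
        parseAltGo cs output (row ++ PySem.List.pyRange col (col + n)) (col + n) []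
      else parseAltGo cs output row (col + n) []

def parse_alt (pattern : String) : List (List Int) :=
  parseAltGo pattern.toList [] [] 0 []

-- ===== PRECONDITION & SPEC =====
def Spec_parse (pattern : String) (out : List (List Int)) : Prop := out = parse_alt pattern
instance (pattern : String) (out : List (List Int)) : Decidable (Spec_parse pattern out) := by unfold Spec_parse; infer_instance

-- ===== CLAIM (what is proved, stated in full; the proofs are below) =====
def Claim_equal_parse : Prop := ∀ (pattern : String), Dom_parse pattern → Spec_parse pattern (parse pattern)

-- ===== LEMMAS AND PROOFS =====

-- alive columns of one (already expanded) row, read left to right from column k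
def pvIdx : List Char → Int → List Int
  | [], _ => []
  | c :: cs, k => (if c = 'o' then [k] else []) ++ pvIdx cs (k + 1)

-- row machine on the EXPANDED string: what A's split-then-scan computes, one char at a time
def pvRows : List Char → List Int → Int → List (List Int)
  | [], row, _ => [row]
  | c :: cs, row, col =>
    if c = '$' then row :: pvRows cs [] 0
    else pvRows cs (row ++ if c = 'o' then [col] else []) (col + 1)

-- rle_decode as structural recursion (the foldl's tail)
def pvRd : List Char → List Char → List Char
  | [], _ => []
  | c :: cs, count =>
    if PySem.Chars.isdigit c then pvRd cs (count ++ [c])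
    else List.replicate ((PySem.Int.ofChars? (if count ≠ [] then count else ['1'])).getD 0).toNat c
           ++ pvRd cs []

-- structural version of split on a single '$'
def pvSplit : List Char → List (List Char)
  | [] => [[]]
  | c :: cs =>
    if c = '$' then [] :: pvSplit cs
    else match pvSplit cs with
      | [] => [[c]]
      | h :: t => (c :: h) :: t

theorem pvSplit_ne_nil (s : List Char) : pvSplit s ≠ [] := by
  cases s with
  | nil => simp [pvSplit]
  | cons c cs =>
    simp only [pvSplit]
    split_ifs
    · simp
    · split <;> simp

theorem pvSplit_go (fuel : Nat) (l cur : List Char) (acc : List (List Char))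
    (h : l.length < fuel) :
    PySem.Chars.splitOn.go ['$'] fuel l cur acc =
      acc.reverse ++ (match pvSplit l with
        | [] => [cur.reverse]
        | h :: t => (cur.reverse ++ h) :: t) := by
  induction fuel generalizing l cur acc with
  | zero => omega
  | succ fuel ih =>
    cases l with
    | nil => simp [PySem.Chars.splitOn.go, pvSplit]
    | cons c rest =>
      by_cases hc : c = '$'
      · subst hc
        rw [PySem.Chars.splitOn.go]
        simp only [List.isPrefixOf, BEq.rfl, Bool.and_true,
          if_pos, List.length_singleton, List.drop_one, List.tail_cons]
        rw [ih rest [] (cur.reverse :: acc) (by simpa using Nat.lt_of_succ_lt_succ h)]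
        simp only [pvSplit]
        obtain ⟨h1, t1, hsp⟩ : ∃ h1 t1, pvSplit rest = h1 :: t1 := by
          cases hsp : pvSplit rest with
          | nil => exact absurd hsp (pvSplit_ne_nil rest)
          | cons a b => exact ⟨a, b, rfl⟩
        rw [hsp]
        simp
      · rw [PySem.Chars.splitOn.go]
        have hpre : List.isPrefixOf ['$'] (c :: rest) = false := by
          simp [List.isPrefixOf]
          exact fun hh => absurd hh.symm hc
        rw [hpre]
        simp only [Bool.false_eq_true, if_false]
        rw [ih rest (c :: cur) acc (by simpa using Nat.lt_of_succ_lt_succ h)]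
        simp only [pvSplit, if_neg hc]
        obtain ⟨h1, t1, hsp⟩ : ∃ h1 t1, pvSplit rest = h1 :: t1 := by
          cases hsp : pvSplit rest with
          | nil => exact absurd hsp (pvSplit_ne_nil rest)
          | cons a b => exact ⟨a, b, rfl⟩
        rw [hsp]
        simp

theorem splitOn_eq_pvSplit (s : List Char) : PySem.Chars.splitOn s ['$'] = pvSplit s := by
  rw [PySem.Chars.splitOn]
  rw [pvSplit_go (s.length + 1) s [] [] (by omega)]
  obtain ⟨h1, t1, hsp⟩ : ∃ h1 t1, pvSplit s = h1 :: t1 := by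
    cases hsp : pvSplit s with
    | nil => exact absurd hsp (pvSplit_ne_nil s)
    | cons a b => exact ⟨a, b, rfl⟩
  rw [hsp]
  simp

theorem pvRle_foldl (cs : List Char) (d count : List Char) :
    (cs.foldl
      (fun (s : List Char × List Char) c =>
        if PySem.Chars.isdigit c then (s.1, s.2 ++ [c])
        else (s.1 ++ PySem.List.pyRepeat [c]
                ((PySem.Int.ofChars? (if s.2 ≠ [] then s.2 else ['1'])).getD 0), []))
      (d, count)).1 = d ++ pvRd cs count := by
  induction cs generalizing d count with
  | nil => simp [pvRd]
  | cons c cs ih =>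
    simp only [List.foldl_cons, pvRd]
    by_cases hd : PySem.Chars.isdigit c = true
    · simp only [hd, if_pos]
      rw [ih]
    · simp only [Bool.not_eq_true] at hd
      simp only [hd, Bool.false_eq_true, if_false]
      rw [ih, PySem.List.pyRepeat_singleton, List.append_assoc]

theorem pvIdx_snoc (xs : List Char) (c : Char) (k : Int) :
    pvIdx (xs ++ [c]) k = pvIdx xs k ++ (if c = 'o' then [k + (xs.length : Int)] else []) := by
  induction xs generalizing k with
  | nil => simp [pvIdx]
  | cons x xs ih =>
    simp only [List.cons_append, pvIdx, ih (k + 1), List.length_cons, List.append_assoc]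
    congr 2
    split_ifs with h
    · congr 1; push_cast; ring
    · rfl

theorem inner_loop_eq (item : List Char) :
    (PySem.List.pyRange 0 (item.length : Int)).foldl
      (fun row i => if PySem.List.pyGet? item i = some 'o' then row ++ [i] else row) []
      = pvIdx item 0 := by
  induction item using List.reverseRecOn with
  | nil => simp [pvIdx, PySem.List.pyRange]
  | append_singleton xs c ih =>
    have hlen : ((xs ++ [c]).length : Int) = (xs.length : Int) + 1 := by simp
    rw [hlen, PySem.List.pyRange_one_append 0 (xs.length : Int) ((xs.length : Int) + 1)
        (by positivity) (by omega), List.foldl_append]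
    have hcong : (PySem.List.pyRange 0 (xs.length : Int)).foldl
        (fun row i => if PySem.List.pyGet? (xs ++ [c]) i = some 'o' then row ++ [i] else row) []
        = (PySem.List.pyRange 0 (xs.length : Int)).foldl
        (fun row i => if PySem.List.pyGet? xs i = some 'o' then row ++ [i] else row) [] := by
      apply PySem.List.foldl_congr_mem
      intro acc i hi
      have hb := (PySem.List.mem_pyRange_one).1 hi
      obtain ⟨m, rfl⟩ : ∃ m : Nat, i = (m : Int) := ⟨i.toNat, by omega⟩
      have hm : m < xs.length := by exact_mod_cast hb.2
      rw [PySem.List.pyGet?_natCast, PySem.List.pyGet?_natCast,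
        List.getElem?_append_left hm]
    rw [hcong, ih, pvIdx_snoc]
    have : PySem.List.pyRange (xs.length : Int) ((xs.length : Int) + 1)
        = [(xs.length : Int)] := by
      rw [PySem.List.pyRange_one_cons (by omega)]
      simp [PySem.List.pyRange]
    rw [this]
    simp only [List.foldl_cons, List.foldl_nil]
    rw [PySem.List.pyGet?_natCast]
    simp
    split_ifs <;> simp

theorem pvRows_split (s : List Char) (row : List Int) (col : Int) :
    pvRows s row col =
      (match pvSplit s with
        | [] => []
        | h :: t => (row ++ pvIdx h col) :: t.map (fun p => pvIdx p 0)) := by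
  induction s generalizing row col with
  | nil => simp [pvRows, pvSplit, pvIdx]
  | cons c cs ih =>
    by_cases hc : c = '$'
    · subst hc
      simp only [pvRows, pvSplit]
      obtain ⟨h, t, hsp⟩ : ∃ h t, pvSplit cs = h :: t := by
        cases hsp : pvSplit cs with
        | nil => exact absurd hsp (pvSplit_ne_nil cs)
        | cons h t => exact ⟨h, t, rfl⟩
      rw [ih [] 0, hsp]
      simp [pvIdx]
    · simp only [pvRows, pvSplit, if_neg hc]
      obtain ⟨h, t, hsp⟩ : ∃ h t, pvSplit cs = h :: t := by
        cases hsp : pvSplit cs with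
        | nil => exact absurd hsp (pvSplit_ne_nil cs)
        | cons h t => exact ⟨h, t, rfl⟩
      rw [ih, hsp]
      simp only [pvIdx, List.append_assoc]

theorem parse_eq_pvRows (pattern : String) :
    parse pattern = pvRows (pvRleDecode pattern.toList) [] 0 := by
  simp only [parse]
  rw [splitOn_eq_pvSplit, PySem.List.foldl_append_singleton_eq_map, pvRows_split]
  obtain ⟨h1, t1, hsp⟩ : ∃ h1 t1, pvSplit (pvRleDecode pattern.toList) = h1 :: t1 := by
    cases hsp : pvSplit (pvRleDecode pattern.toList) with
    | nil => exact absurd hsp (pvSplit_ne_nil _)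
    | cons a b => exact ⟨a, b, rfl⟩
  rw [hsp]
  simp only [List.nil_append, List.map_cons]
  congr 1
  · exact inner_loop_eq h1
  · apply List.map_congr_left
    intro p _
    exact inner_loop_eq p

theorem pvRows_replicate_dollar (n : Nat) (cs : List Char) (row : List Int) (col : Int) :
    pvRows (List.replicate (n + 1) '$' ++ cs) row col =
      row :: (List.replicate n ([] : List Int) ++ pvRows cs [] 0) := by
  induction n generalizing row col with
  | zero => simp [pvRows]
  | succ n ih =>
    rw [List.replicate_succ, List.cons_append]
    simp only [pvRows]
    rw [ih [] 0, List.replicate_succ]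
    simp [List.replicate_succ]

theorem pvRows_replicate_o (n : Nat) (cs : List Char) (row : List Int) (col : Int) :
    pvRows (List.replicate n 'o' ++ cs) row col =
      pvRows cs (row ++ PySem.List.pyRange col (col + (n : Int))) (col + (n : Int)) := by
  induction n generalizing row col with
  | zero => simp [PySem.List.pyRange]
  | succ n ih =>
    rw [List.replicate_succ, List.cons_append]
    simp only [pvRows, if_neg (by decide : ¬ 'o' = '$')]
    rw [ih]
    push_cast
    have h1 : col + ((n : Int) + 1) = (col + 1) + (n : Int) := by ring
    rw [h1, PySem.List.pyRange_one_cons (by omega : col < (col + 1) + (n : Int))]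
    simp

theorem pvRows_replicate_other (c : Char) (hd : c ≠ '$') (ho : c ≠ 'o')
    (n : Nat) (cs : List Char) (row : List Int) (col : Int) :
    pvRows (List.replicate n c ++ cs) row col = pvRows cs row (col + (n : Int)) := by
  induction n generalizing col with
  | zero => simp
  | succ n ih =>
    rw [List.replicate_succ, List.cons_append]
    simp only [pvRows, if_neg hd, if_neg ho, List.append_nil]
    rw [ih]
    congr 1
    push_cast; ring

theorem pv_getD_natCast_nonneg (o : Option Nat) :
    0 ≤ (Option.map (fun n => n) (do let a ← o; pure ((a : Int)))).getD 0 := by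
  cases o <;> simp

theorem digit_not_space (x : Char) (hx : PySem.Chars.isdigit x = true) :
    PySem.Int.isIntSpace x = false := by
  simp only [PySem.Chars.isdigit, Bool.and_eq_true, decide_eq_true_eq] at hx
  simp only [PySem.Int.isIntSpace]
  have h1 := hx.1
  have h2 := hx.2
  simp only [Bool.or_eq_false_iff, decide_eq_false_iff_not]
  refine ⟨⟨⟨⟨⟨?_, ?_⟩, ?_⟩, ?_⟩, ?_⟩, ?_⟩ <;>
    (intro hEq; subst hEq; revert h1 h2; decide)

theorem dropWhile_digits (p : Char → Bool) (l : List Char)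
    (h : ∀ x ∈ l, p x = false) : l.dropWhile p = l := by
  cases l with
  | nil => rfl
  | cons a l => exact List.dropWhile_cons_of_neg (by simp [h a (List.mem_cons_self)])

theorem ofChars_digits_nonneg (count : List Char)
    (h : ∀ x ∈ count, PySem.Chars.isdigit x = true) :
    0 ≤ (PySem.Int.ofChars? (if count ≠ [] then count else ['1'])).getD 0 := by
  by_cases hc : count = []
  · subst hc; decide
  · rw [if_pos hc]
    obtain ⟨c, rest, rfl⟩ : ∃ c rest, count = c :: rest := by
      cases count with
      | nil => exact absurd rfl hc
      | cons a b => exact ⟨a, b, rfl⟩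
    have hspace : ∀ x ∈ c :: rest, PySem.Int.isIntSpace x = false :=
      fun x hx => digit_not_space x (h x hx)
    rw [PySem.Int.ofChars?]
    simp only [dropWhile_digits _ _ hspace,
      dropWhile_digits _ _ (fun x hx => hspace x (List.mem_reverse.mp hx)),
      List.reverse_reverse]
    have hdc := h c (List.mem_cons_self)
    simp only [PySem.Chars.isdigit, Bool.and_eq_true, decide_eq_true_eq] at hdc
    split
    · rename_i ds heq
      exfalso
      have : c = '-' := by injection heq
      subst this; revert hdc; decide
    · rename_i ds heq
      exfalso
      have : c = '+' := by injection heq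
      subst this; revert hdc; decide
    · exact pv_getD_natCast_nonneg _

theorem nval_eq (count : List Char) :
    (if count ≠ [] then (PySem.Int.ofChars? count).getD 0 else 1)
      = (PySem.Int.ofChars? (if count ≠ [] then count else ['1'])).getD 0 := by
  by_cases hc : count = []
  · subst hc; decide
  · simp [hc]

theorem parseAltGo_eq (cs : List Char) (output : List (List Int)) (row : List Int)
    (col : Int) (count : List Char) (h : ∀ x ∈ count, PySem.Chars.isdigit x = true) :
    parseAltGo cs output row col count = output ++ pvRows (pvRd cs count) row col := by
  induction cs generalizing output row col count with
  | nil => simp [parseAltGo, pvRd, pvRows]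
  | cons c cs ih =>
    by_cases hdig : PySem.Chars.isdigit c = true
    · simp only [parseAltGo, hdig, if_pos]
      rw [ih _ _ _ _ (fun x hx => by
        rcases List.mem_append.mp hx with h1 | h1
        · exact h x h1
        · simpa using (List.mem_singleton.mp h1) ▸ hdig)]
      simp only [pvRd, hdig, if_pos]
    · simp only [parseAltGo, hdig, Bool.false_eq_true, if_false]
      simp only [pvRd, hdig, Bool.false_eq_true, if_false]
      rw [nval_eq count]
      set n : Int := (PySem.Int.ofChars? (if count ≠ [] then count else ['1'])).getD 0 with hn
      have hnn : 0 ≤ n := ofChars_digits_nonneg count h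
      by_cases hds : c = '$'
      · subst hds
        by_cases hpos : 0 < n
        · rw [if_pos hpos, ih _ _ _ _ (by simp)]
          have hrep : n.toNat = (n - 1).toNat + 1 := by omega
          rw [hrep, pvRows_replicate_dollar]
          simp
        · rw [if_neg hpos, ih _ _ _ _ (by simp)]
          have : n.toNat = 0 := by omega
          rw [this]
          simp
      · by_cases ho : c = 'o'
        · subst ho
          simp only [if_neg (by decide : ¬ 'o' = '$')]
          rw [ih _ _ _ _ (by simp), pvRows_replicate_o]
          rw [Int.toNat_of_nonneg hnn]
          simp
        · simp only [if_neg hds, if_neg ho]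
          rw [ih _ _ _ _ (by simp), pvRows_replicate_other c hds ho]
          rw [Int.toNat_of_nonneg hnn]

-- ===== VERDICT (by name: the statement is the Claim_ definition above) =====
theorem parse_spec : Claim_equal_parse := by
  intro pattern _
  unfold Spec_parse parse_alt
  rw [parse_eq_pvRows, parseAltGo_eq _ _ _ _ _ (by simp)]
  unfold pvRleDecode
  rw [pvRle_foldl]
  simp
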